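-- pv_equiv track=rewrite | github.com/dhruvmadhwal/disagreement-based-abstention | analyze/summary_utils.py | _tally_correctness_records
-- ===== SOURCE A (Python) =====
-- from typing import Dict, Iterable, Iterator, List, Optional, Tuple
--
-- def _tally_correctness_records(records: Iterable[dict]) -> Optional[Tuple[int, int, int, int]]:
--     evaluated = 0
--     correct = 0
--     incorrect = 0
--     not_meaningful = 0
--     found = False
--     for record in records:
--         if not isinstance(record, dict):
--             continue
--         val = record.get("correct")
--         if val is None:
--             continue
--         found = True
--         if isinstance(val, str):
--             try:
--                 val = float(val)
--             except ValueError: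
--                 continue
--         if val == 1:
--             correct += 1
--             evaluated += 1
--         elif val == 0:
--             incorrect += 1
--             evaluated += 1
--         elif val == -1:
--             not_meaningful += 1
--             evaluated += 1
--         else:
--             not_meaningful += 1
--             evaluated += 1
--     if not found or evaluated == 0:
--         return None
--     return evaluated, correct, incorrect, not_meaningful
-- ===== SOURCE B (Python) =====
-- def _tally_correctness_records(records):
--     parsed = []
--     for record in records:
--         if not isinstance(record, dict):
--             continue
--         val = record.get("correct")
--         if val is None:
--             continue
--         if isinstance(val, str):
--             try:
--                 val = float(val)
--             except ValueError:
--                 continue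
--         parsed.append(val)
--     if not parsed:
--         return None
--     evaluated = len(parsed)
--     correct = sum(1 for v in parsed if v == 1)
--     incorrect = sum(1 for v in parsed if v == 0)
--     return evaluated, correct, incorrect, evaluated - correct - incorrect
-- ===== Notes on version B (the rewrite author's own statement) =====
-- stated objective: simpler
-- what changed: Replaces the single fused five-accumulator loop (with a redundant found flag) by a parse-into-list phase followed by separate reductions: evaluated = len(parsed), correct/incorrect counted by comprehension, not_meaningful derived as evaluated - correct - incorrect.
import Mathlib
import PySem

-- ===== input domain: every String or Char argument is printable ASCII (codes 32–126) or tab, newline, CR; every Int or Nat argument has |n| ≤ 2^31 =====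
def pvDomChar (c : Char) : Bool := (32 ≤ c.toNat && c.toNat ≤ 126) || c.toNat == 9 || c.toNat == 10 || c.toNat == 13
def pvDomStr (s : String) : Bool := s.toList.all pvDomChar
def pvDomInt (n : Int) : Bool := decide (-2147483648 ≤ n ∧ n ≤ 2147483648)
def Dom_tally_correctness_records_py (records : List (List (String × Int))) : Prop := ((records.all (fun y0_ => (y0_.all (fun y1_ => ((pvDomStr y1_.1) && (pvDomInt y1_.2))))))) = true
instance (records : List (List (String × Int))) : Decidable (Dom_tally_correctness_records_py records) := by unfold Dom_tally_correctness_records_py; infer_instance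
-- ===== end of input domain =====

-- B replaces A's fused five-accumulator loop (with its redundant found flag) by a
-- parse-into-list phase followed by separate count reductions (objective: simpler).

-- ===== PORT A =====
-- A's loop body: each record's "correct" value (missing key = Python None → skip) updates
-- the five accumulators (evaluated, correct, incorrect, not_meaningful, found).
-- (The str/float branch of A is unreachable here: values are ints under the type convention.)
def tallyStepA (s : Int × Int × Int × Int × Bool) (record : List (String × Int)) :
    Int × Int × Int × Int × Bool :=
  match (PySem.Dict.mk record).get? "correct" with
  | none => s
  | some val =>
    if val = 1 then (s.1 + 1, s.2.1 + 1, s.2.2.1, s.2.2.2.1, true)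
    else if val = 0 then (s.1 + 1, s.2.1, s.2.2.1 + 1, s.2.2.2.1, true)
    else if val = -1 then (s.1 + 1, s.2.1, s.2.2.1, s.2.2.2.1 + 1, true)
    else (s.1 + 1, s.2.1, s.2.2.1, s.2.2.2.1 + 1, true)

def tally_correctness_records_py (records : List (List (String × Int))) :
    Option (Int × Int × Int × Int) :=
  let st := records.foldl tallyStepA (0, 0, 0, 0, false)
  if st.2.2.2.2 = false ∨ st.1 = 0 then none
  else some (st.1, st.2.1, st.2.2.1, st.2.2.2.1)

-- ===== PORT B =====
def tally_correctness_records_py_alt (records : List (List (String × Int))) :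
    Option (Int × Int × Int × Int) :=
  let parsed := records.filterMap (fun r => (PySem.Dict.mk r).get? "correct")
  if parsed.isEmpty then none
  else
    let evaluated : Int := parsed.length
    let correct : Int := (parsed.filter (fun v => v == 1)).length
    let incorrect : Int := (parsed.filter (fun v => v == 0)).length
    some (evaluated, correct, incorrect, evaluated - correct - incorrect)

-- ===== PRECONDITION & SPEC =====
def Spec_tally_correctness_records_py (records : List (List (String × Int))) (out : Option (Int × Int × Int × Int)) : Prop := out = tally_correctness_records_py_alt records
instance (records : List (List (String × Int))) (out : Option (Int × Int × Int × Int)) : Decidable (Spec_tally_correctness_records_py records out) := by unfold Spec_tally_correctness_records_py; infer_instance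

-- ===== CLAIM (what is proved, stated in full; the proofs are below) =====
def Claim_equal_tally_correctness_records_py : Prop := ∀ (records : List (List (String × Int))), Dom_tally_correctness_records_py records → Spec_tally_correctness_records_py records (tally_correctness_records_py records)

-- ===== LEMMAS AND PROOFS =====

-- A's fold state, started at (ev,c,i,nm,f), equals the counts B computes over parsed.
lemma tally_fold_eq (recs : List (List (String × Int))) (ev c i nm : Int) (f : Bool) :
    recs.foldl tallyStepA (ev, c, i, nm, f) =
      (ev + ((recs.filterMap (fun r => (PySem.Dict.mk r).get? "correct")).length : Int),
       c + (((recs.filterMap (fun r => (PySem.Dict.mk r).get? "correct")).filter (fun v => v == 1)).length : Int),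
       i + (((recs.filterMap (fun r => (PySem.Dict.mk r).get? "correct")).filter (fun v => v == 0)).length : Int),
       nm + (((recs.filterMap (fun r => (PySem.Dict.mk r).get? "correct")).length : Int)
             - (((recs.filterMap (fun r => (PySem.Dict.mk r).get? "correct")).filter (fun v => v == 1)).length : Int)
             - (((recs.filterMap (fun r => (PySem.Dict.mk r).get? "correct")).filter (fun v => v == 0)).length : Int)),
       f || !(recs.filterMap (fun r => (PySem.Dict.mk r).get? "correct")).isEmpty) := by
  induction recs generalizing ev c i nm f with
  | nil => simp
  | cons r rs ih =>
    simp only [List.foldl_cons, List.filterMap_cons]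
    cases h : (PySem.Dict.mk r).get? "correct" with
    | none => simp [tallyStepA, h, ih]
    | some val =>
      simp only [tallyStepA, h]
      by_cases h1 : val = 1
      · simp [h1, ih]; omega
      · by_cases h0 : val = 0
        · simp [h0, ih]; omega
        · by_cases hm : val = -1 <;> simp [h1, h0, hm, ih] <;> omega

-- ===== VERDICT (by name: the statement is the Claim_ definition above) =====
theorem tally_correctness_records_py_spec : Claim_equal_tally_correctness_records_py := by
  intro records _
  unfold Spec_tally_correctness_records_py tally_correctness_records_py tally_correctness_records_py_alt
  simp only [tally_fold_eq]
  cases h : (records.filterMap (fun r => (PySem.Dict.mk r).get? "correct")).isEmpty <;>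
    simp [List.isEmpty_iff] at h <;> simp [h]
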